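-- pv_equiv track=rewrite | github.com/DancingOnAir/LeetcodePythonSolution | array/presum/3755_find_maximum_balanced_xor_subarray_length.py | maxBalancedSubarray
-- ===== SOURCE A (Python) =====
-- from typing import List
--
-- def maxBalancedSubarray(nums: List[int]) -> int:
--     n = len(nums)
--     acc = 0
--     balance = 0
--     m = {(0, 0): -1}
--     res = 0
--     for i, x in enumerate(nums):
--         acc ^= x
--         balance += 1 if x & 1 else -1
--         k = (acc, balance)
--         if k in m:
--             res = max(res, i - m[k])
--         else:
--             m[k] = i
--     return res
-- ===== SOURCE B (Python) =====
-- from typing import List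
--
-- def maxBalancedSubarray(nums: List[int]) -> int:
--     res = 0
--     for l in range(len(nums)):
--         xr = 0
--         bal = 0
--         for length, x in enumerate(nums[l:], 1):
--             xr ^= x
--             bal += 1 if x & 1 else -1
--             if xr == 0 and bal == 0:
--                 res = max(res, length)
--     return res
-- ===== Notes on version B (the rewrite author's own statement) =====
-- stated objective: alternative
-- what changed: Replaces the prefix-state hashmap with first-occurrence indices by a brute-force scan that restarts xor and parity balance at every start index and records the length of each balanced subarray directly.
import Mathlib
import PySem

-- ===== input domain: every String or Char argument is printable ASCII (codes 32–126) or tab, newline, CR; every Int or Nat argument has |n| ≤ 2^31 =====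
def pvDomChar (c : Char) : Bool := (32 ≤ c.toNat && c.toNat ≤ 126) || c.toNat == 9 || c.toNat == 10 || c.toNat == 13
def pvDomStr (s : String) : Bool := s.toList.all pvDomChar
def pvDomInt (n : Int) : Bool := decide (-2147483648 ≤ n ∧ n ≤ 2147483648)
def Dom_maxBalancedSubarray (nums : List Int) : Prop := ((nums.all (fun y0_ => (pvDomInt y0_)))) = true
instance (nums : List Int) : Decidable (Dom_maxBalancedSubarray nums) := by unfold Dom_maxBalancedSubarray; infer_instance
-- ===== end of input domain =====

-- B replaces A's single-pass prefix-state hashmap by a brute-force rescan from every start index (alternative decomposition, not faster).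

-- ===== PORT A =====
-- loop body of A: state (acc, balance, m, res), element (i, x)
def pvBodyA (s : Int × Int × PySem.Dict (Int × Int) Int × Int) (p : Int × Int) :
    Int × Int × PySem.Dict (Int × Int) Int × Int :=
  match s, p with
  | (acc, balance, m, res), (i, x) =>
    let acc := PySem.Int.bxor acc x
    let balance := balance + (if PySem.Int.band x 1 ≠ 0 then 1 else -1)
    let k := (acc, balance)
    match m.get? k with
    | some v => (acc, balance, m, max res (i - v))
    | none => (acc, balance, m.insert k i, res)

def maxBalancedSubarray (nums : List Int) : Int :=
  ((PySem.List.enumerate nums 0).foldl pvBodyA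
    (0, 0, PySem.Dict.empty.insert (0, 0) (-1), 0)).2.2.2

-- ===== PORT B =====
-- inner loop body of B: state (xr, bal, res), element (length, x)
def pvInnerB (st : Int × Int × Int) (p : Int × Int) : Int × Int × Int :=
  match st, p with
  | (xr, bal, res), (length, x) =>
    let xr := PySem.Int.bxor xr x
    let bal := bal + (if PySem.Int.band x 1 ≠ 0 then 1 else -1)
    (xr, bal, if xr = 0 ∧ bal = 0 then max res length else res)

-- one outer iteration of B: rescan nums[l:] from a fresh (0, 0) state
def pvOuterB (nums : List Int) (res l : Int) : Int :=
  ((PySem.List.enumerate (PySem.List.slice nums (some l) none) 1).foldl pvInnerB (0, 0, res)).2.2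

def maxBalancedSubarray_alt (nums : List Int) : Int :=
  (PySem.List.pyRange 0 (nums.length : Int) 1).foldl (pvOuterB nums) 0

-- ===== PRECONDITION & SPEC =====
def Spec_maxBalancedSubarray (nums : List Int) (out : Int) : Prop := out = maxBalancedSubarray_alt nums
instance (nums : List Int) (out : Int) : Decidable (Spec_maxBalancedSubarray nums out) := by unfold Spec_maxBalancedSubarray; infer_instance

-- ===== CLAIM (what is proved, stated in full; the proofs are below) =====
def Claim_equal_maxBalancedSubarray : Prop := ∀ (nums : List Int), Dom_maxBalancedSubarray nums → Spec_maxBalancedSubarray nums (maxBalancedSubarray nums)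

-- ===== LEMMAS AND PROOFS =====

-- Python's xor is associative
theorem pvBxorAssoc (a b c : Int) :
    PySem.Int.bxor (PySem.Int.bxor a b) c = PySem.Int.bxor a (PySem.Int.bxor b c) := by
  have hr : ∀ n : Nat, (-(-(n : Int) - 1) - 1).toNat = n := by intro n; omega
  unfold PySem.Int.bxor
  split_ifs <;>
    simp_all [Int.toNat_natCast] <;>
    first
      | omega
      | rw [Nat.xor_assoc]

theorem pvBxorZeroLeft (x : Int) : PySem.Int.bxor 0 x = x := by
  rw [PySem.Int.bxor_comm]; exact PySem.Int.bxor_zero x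

-- xor-ing a fixed value fixes a point iff the value is zero
theorem pvBxorFix (a x : Int) : PySem.Int.bxor a x = a ↔ x = 0 := by
  constructor
  · intro h
    calc x = PySem.Int.bxor 0 x := (pvBxorZeroLeft x).symm
      _ = PySem.Int.bxor (PySem.Int.bxor a a) x := by rw [PySem.Int.bxor_self]
      _ = PySem.Int.bxor a (PySem.Int.bxor a x) := pvBxorAssoc a a x
      _ = PySem.Int.bxor a a := by rw [h]
      _ = 0 := PySem.Int.bxor_self a
  · intro h; rw [h]; exact PySem.Int.bxor_zero a

-- the common (xor, parity-balance) step both programs take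
def pvStep (s : Int × Int) (x : Int) : Int × Int :=
  (PySem.Int.bxor s.1 x, s.2 + (if PySem.Int.band x 1 ≠ 0 then 1 else -1))

-- prefix state after j elements
def pvState (ys : List Int) (j : Nat) : Int × Int := (ys.take j).foldl pvStep (0, 0)

theorem pvState_succ (ys : List Int) (t : Nat) (x : Int) (rest : List Int)
    (h : ys.drop t = x :: rest) : pvState ys (t + 1) = pvStep (pvState ys t) x := by
  have ht : t < ys.length := by
    by_contra hc
    rw [List.drop_eq_nil_iff.mpr (by omega)] at h
    simp at h
  have hx : ys[t]? = some x := by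
    rw [List.drop_eq_getElem_cons ht] at h
    simp [List.getElem?_eq_getElem ht, (List.cons.injEq _ _ _ _ ▸ h).1]
  unfold pvState
  rw [List.take_add_one, hx]
  simp [List.foldl_append]

-- running the step from any start state shifts by the run from (0,0)
theorem pvTransfer (seg : List Int) : ∀ a b : Int,
    seg.foldl pvStep (a, b) =
      (PySem.Int.bxor a (seg.foldl pvStep (0, 0)).1, b + (seg.foldl pvStep (0, 0)).2) := by
  induction seg with
  | nil => intro a b; simp [PySem.Int.bxor_zero]
  | cons y seg ih =>
    intro a b
    simp only [List.foldl_cons]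
    have h0 : pvStep (0, 0) y = (y, (if PySem.Int.band y 1 ≠ 0 then 1 else -1)) := by
      simp [pvStep, pvBxorZeroLeft]
    have h1 : pvStep (a, b) y
        = (PySem.Int.bxor a y, b + (if PySem.Int.band y 1 ≠ 0 then 1 else -1)) := rfl
    rw [h0, h1, ih (PySem.Int.bxor a y), ih y]
    simp only [Prod.mk.injEq]
    exact ⟨pvBxorAssoc a y _, by ring⟩

-- a segment run fixes its start state iff its own run from (0,0) is (0,0)
theorem pvLoopZero (seg : List Int) (s : Int × Int) :
    seg.foldl pvStep s = s ↔ seg.foldl pvStep (0, 0) = (0, 0) := by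
  obtain ⟨a, b⟩ := s
  rw [pvTransfer seg a b, Prod.mk.injEq, Prod.ext_iff, pvBxorFix]
  constructor <;> intro ⟨h1, h2⟩ <;> exact ⟨h1, by omega⟩

-- a balanced subarray of length m at l is a pair of equal prefix states
theorem pvGoodIff (nums : List Int) (l m : Nat) :
    pvState (nums.drop l) m = (0, 0) ↔ pvState nums (l + m) = pvState nums l := by
  have h : nums.take (l + m) = nums.take l ++ (nums.drop l).take m := List.take_add
  unfold pvState
  rw [h, List.foldl_append]
  exact (pvLoopZero ((nums.drop l).take m) ((nums.take l).foldl pvStep (0, 0))).symm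

-- a pair of equal prefix states = a balanced subarray nums[j:i]
def pvPair (nums : List Int) (j i : Nat) : Prop :=
  j < i ∧ i ≤ nums.length ∧ pvState nums j = pvState nums i

-- what both programs compute: the maximum pair width (0 if none)
def pvIsMax (nums : List Int) (v : Int) : Prop :=
  0 ≤ v ∧ (v = 0 ∨ ∃ j i : Nat, pvPair nums j i ∧ v = (i : Int) - (j : Int)) ∧
    ∀ j i : Nat, pvPair nums j i → (i : Int) - (j : Int) ≤ v

theorem pvIsMax_unique (nums : List Int) (v w : Int) (hv : pvIsMax nums v) (hw : pvIsMax nums w) :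
    v = w := by
  obtain ⟨hv0, hvm, hvb⟩ := hv
  obtain ⟨hw0, hwm, hwb⟩ := hw
  apply le_antisymm
  · rcases hvm with h | ⟨j, i, hp, rfl⟩
    · omega
    · exact hwb j i hp
  · rcases hwm with h | ⟨j, i, hp, rfl⟩
    · omega
    · exact hvb j i hp

-- ===== A's loop invariant =====

def pvDictInv (nums : List Int) (t : Nat) (m : PySem.Dict (Int × Int) Int) : Prop :=
  ∀ k v, m.get? k = some v ↔
    ∃ j : Nat, j ≤ t ∧ pvState nums j = k ∧ v = (j : Int) - 1 ∧
      ∀ j' : Nat, j' < j → pvState nums j' ≠ k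

def pvInvA (nums : List Int) (t : Nat) (s : Int × Int × PySem.Dict (Int × Int) Int × Int) : Prop :=
  (s.1, s.2.1) = pvState nums t ∧ pvDictInv nums t s.2.2.1 ∧ 0 ≤ s.2.2.2 ∧
    (s.2.2.2 = 0 ∨ ∃ j i : Nat, pvPair nums j i ∧ s.2.2.2 = (i : Int) - (j : Int)) ∧
    ∀ j i : Nat, pvPair nums j i → i ≤ t → (i : Int) - (j : Int) ≤ s.2.2.2

theorem pvAstep (nums : List Int) (t : Nat) (x : Int) (rest : List Int)
    (s : Int × Int × PySem.Dict (Int × Int) Int × Int)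
    (hd : nums.drop t = x :: rest) (h : pvInvA nums t s) :
    pvInvA nums (t + 1) (pvBodyA s ((t : Int), x)) := by
  obtain ⟨acc, bal, m, res⟩ := s
  obtain ⟨hst, hdict, hres0, hmem, hbound⟩ := h
  have htlt : t < nums.length := by
    have := congrArg List.length hd
    simp [List.length_drop] at this
    omega
  have hs1 : pvState nums (t + 1) = pvStep (pvState nums t) x := pvState_succ nums t x rest hd
  have hk : (PySem.Int.bxor acc x, bal + (if PySem.Int.band x 1 ≠ 0 then 1 else -1))
      = pvState nums (t + 1) := by
    rw [hs1, ← hst]; rfl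
  cases hget : m.get? (pvState nums (t + 1)) with
  | some v =>
    obtain ⟨j, hj, hpj, hv, hmin⟩ := (hdict _ v).mp hget
    have hget' : m.get? (PySem.Int.bxor acc x,
        bal + (if PySem.Int.band x 1 ≠ 0 then 1 else -1)) = some v := by
      rw [hk]; exact hget
    have hbody : pvBodyA (acc, bal, m, res) ((t : Int), x)
        = (PySem.Int.bxor acc x, bal + (if PySem.Int.band x 1 ≠ 0 then 1 else -1), m,
            max res ((t : Int) - v)) := by
      simp only [pvBodyA]
      rw [hget']
    rw [hbody]
    refine ⟨hk, ?_, ?_, ?_, ?_⟩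
    · show pvDictInv nums (t + 1) m
      intro k' v'
      constructor
      · intro hg
        obtain ⟨j0, hj0, h1, h2, h3⟩ := (hdict k' v').mp hg
        exact ⟨j0, by omega, h1, h2, h3⟩
      · rintro ⟨j0, hj0, h1, h2, h3⟩
        rcases Nat.lt_or_ge j0 (t + 1) with hlt | hge
        · exact (hdict k' v').mpr ⟨j0, by omega, h1, h2, h3⟩
        · have hj0e : j0 = t + 1 := by omega
          subst hj0e
          exact absurd (h1 ▸ hpj) (h3 j (by omega))
    · show 0 ≤ max res ((t : Int) - v)
      exact le_trans hres0 (le_max_left _ _)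
    · show max res ((t : Int) - v) = 0 ∨
        ∃ j i : Nat, pvPair nums j i ∧ max res ((t : Int) - v) = (i : Int) - (j : Int)
      rcases max_choice res ((t : Int) - v) with hmx | hmx <;> rw [hmx]
      · exact hmem
      · exact Or.inr ⟨j, t + 1, ⟨by omega, by omega, hpj⟩, by omega⟩
    · intro j' i' hp hi'
      show (i' : Int) - (j' : Int) ≤ max res ((t : Int) - v)
      rcases Nat.lt_or_ge i' (t + 1) with hlt | hge
      · exact le_trans (hbound j' i' hp (by omega)) (le_max_left _ _)
      · have hie : i' = t + 1 := by omega
        subst hie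
        have hj'k : pvState nums j' = pvState nums (t + 1) := hp.2.2
        have hnotlt : ¬ j' < j := fun hc => (hmin j' hc) hj'k
        have h2 := le_max_right res ((t : Int) - v)
        have hjlt : j' < t + 1 := hp.1
        omega
  | none =>
    have hno : ∀ j : Nat, j ≤ t → pvState nums j ≠ pvState nums (t + 1) := by
      intro j hj hpj
      have hex : ∃ j0 : Nat, j0 ≤ t ∧ pvState nums j0 = pvState nums (t + 1) := ⟨j, hj, hpj⟩
      have hspec := Nat.find_spec hex
      have hg : m.get? (pvState nums (t + 1)) = some ((Nat.find hex : Int) - 1) := by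
        apply (hdict _ _).mpr
        refine ⟨Nat.find hex, hspec.1, hspec.2, rfl, ?_⟩
        intro j' hj' hpj'
        exact Nat.find_min hex hj' ⟨by omega, hpj'⟩
      rw [hget] at hg
      simp at hg
    have hget' : m.get? (PySem.Int.bxor acc x,
        bal + (if PySem.Int.band x 1 ≠ 0 then 1 else -1)) = none := by
      rw [hk]; exact hget
    have hbody : pvBodyA (acc, bal, m, res) ((t : Int), x)
        = (PySem.Int.bxor acc x, bal + (if PySem.Int.band x 1 ≠ 0 then 1 else -1),
            m.insert (pvState nums (t + 1)) ((t : Int)), res) := by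
      simp only [pvBodyA]
      rw [hget', ← hk]
    rw [hbody]
    refine ⟨hk, ?_, hres0, hmem, ?_⟩
    · show pvDictInv nums (t + 1) (m.insert (pvState nums (t + 1)) ((t : Int)))
      intro k' v'
      by_cases hkk : k' = pvState nums (t + 1)
      · subst hkk
        rw [PySem.Dict.get?_insert_self]
        constructor
        · intro hg
          have hv' : v' = (t : Int) := (Option.some.inj hg).symm
          exact ⟨t + 1, le_refl _, rfl, by omega, fun j' hj' => hno j' (by omega)⟩
        · rintro ⟨j0, hj0, h1, h2, _⟩
          rcases Nat.lt_or_ge j0 (t + 1) with hlt | hge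
          · exact absurd h1 (hno j0 (by omega))
          · have hj0e : j0 = t + 1 := by omega
            subst hj0e
            congr 1
            omega
      · rw [PySem.Dict.get?_insert_of_ne _ _ hkk]
        constructor
        · intro hg
          obtain ⟨j0, hj0, h1, h2, h3⟩ := (hdict k' v').mp hg
          exact ⟨j0, by omega, h1, h2, h3⟩
        · rintro ⟨j0, hj0, h1, h2, h3⟩
          rcases Nat.lt_or_ge j0 (t + 1) with hlt | hge
          · exact (hdict k' v').mpr ⟨j0, by omega, h1, h2, h3⟩
          · have hj0e : j0 = t + 1 := by omega
            subst hj0e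
            exact absurd h1.symm hkk
    · intro j' i' hp hi'
      show (i' : Int) - (j' : Int) ≤ res
      rcases Nat.lt_or_ge i' (t + 1) with hlt | hge
      · exact hbound j' i' hp (by omega)
      · have hie : i' = t + 1 := by omega
        subst hie
        exact absurd hp.2.2 (hno j' (by have := hp.1; omega))

theorem pvAloop : ∀ (rest : List Int) (nums : List Int) (t : Nat)
    (s : Int × Int × PySem.Dict (Int × Int) Int × Int),
    nums.drop t = rest → pvInvA nums t s →
    pvInvA nums (t + rest.length) ((PySem.List.enumerate rest (t : Int)).foldl pvBodyA s) := by
  intro rest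
  induction rest with
  | nil => intro nums t s _ h; simpa [PySem.List.enumerate_nil] using h
  | cons x rest ih =>
    intro nums t s hd h
    have hd' : nums.drop (t + 1) = rest := by
      have h1 := congrArg (List.drop 1) hd
      rw [List.drop_drop] at h1
      simpa [Nat.add_comm] using h1
    have hstep := pvAstep nums t x rest s hd h
    have hres := ih nums (t + 1) (pvBodyA s ((t : Int), x)) hd' hstep
    rw [PySem.List.enumerate_cons, List.foldl_cons]
    have hc : ((t : Int) + 1) = ((t + 1 : Nat) : Int) := by push_cast; ring
    rw [hc]
    have harith : t + 1 + rest.length = t + (x :: rest).length := by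
      simp only [List.length_cons]; omega
    rwa [harith] at hres

theorem pvA_isMax (nums : List Int) : pvIsMax nums (maxBalancedSubarray nums) := by
  have hbase : pvInvA nums 0 (0, 0, PySem.Dict.empty.insert (0, 0) (-1), 0) := by
    refine ⟨rfl, ?_, le_refl _, Or.inl rfl, ?_⟩
    · show pvDictInv nums 0 (PySem.Dict.empty.insert (0, 0) (-1))
      intro k v
      by_cases hk0 : k = ((0 : Int), (0 : Int))
      · subst hk0
        rw [PySem.Dict.get?_insert_self]
        constructor
        · intro hg
          have hv := Option.some.inj hg
          exact ⟨0, le_refl _, rfl, by omega, fun j' hj' => absurd hj' (Nat.not_lt_zero j')⟩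
        · rintro ⟨j0, hj0, h1, h2, _⟩
          have hj0e : j0 = 0 := by omega
          subst hj0e
          congr 1
          omega
      · rw [PySem.Dict.get?_insert_of_ne _ _ hk0, PySem.Dict.get?_empty]
        constructor
        · intro hg; simp at hg
        · rintro ⟨j0, hj0, h1, _, _⟩
          have hj0e : j0 = 0 := by omega
          subst hj0e
          exact absurd h1.symm hk0
    · intro j i hp hi
      show (i : Int) - (j : Int) ≤ (0 : Int)
      have := hp.1
      omega
  have hfin := pvAloop nums nums 0 _ (by simp) hbase
  obtain ⟨_, _, h0, hmem, hbound⟩ := hfin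
  refine ⟨h0, hmem, ?_⟩
  intro j i hp
  exact hbound j i hp (by have := hp.2.1; omega)

-- ===== B's loop invariants =====

theorem pvBinner : ∀ (rest : List Int) (ys : List Int) (k : Nat) (xr bal res : Int),
    ys.drop k = rest → (xr, bal) = pvState ys k →
    res ≤ ((PySem.List.enumerate rest ((k : Int) + 1)).foldl pvInnerB (xr, bal, res)).2.2 ∧
    (((PySem.List.enumerate rest ((k : Int) + 1)).foldl pvInnerB (xr, bal, res)).2.2 = res ∨
      ∃ m : Nat, k < m ∧ m ≤ ys.length ∧ pvState ys m = (0, 0) ∧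
        ((PySem.List.enumerate rest ((k : Int) + 1)).foldl pvInnerB (xr, bal, res)).2.2 = (m : Int)) ∧
    ∀ m : Nat, k < m → m ≤ ys.length → pvState ys m = (0, 0) →
      (m : Int) ≤ ((PySem.List.enumerate rest ((k : Int) + 1)).foldl pvInnerB (xr, bal, res)).2.2 := by
  intro rest
  induction rest with
  | nil =>
    intro ys k xr bal res hd _
    have hk : ys.length ≤ k := by
      by_contra hc
      rw [List.drop_eq_nil_iff] at hd
      omega
    rw [PySem.List.enumerate_nil, List.foldl_nil]
    refine ⟨le_refl _, Or.inl rfl, ?_⟩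
    intro m hm1 hm2 _
    omega
  | cons x rest ih =>
    intro ys k xr bal res hd hstate
    have hklt : k < ys.length := by
      by_contra hc
      rw [List.drop_eq_nil_iff.mpr (by omega)] at hd
      simp at hd
    have hd' : ys.drop (k + 1) = rest := by
      have h1 := congrArg (List.drop 1) hd
      rw [List.drop_drop] at h1
      simpa [Nat.add_comm] using h1
    have hnew : (PySem.Int.bxor xr x, bal + (if PySem.Int.band x 1 ≠ 0 then 1 else -1))
        = pvState ys (k + 1) := by
      rw [pvState_succ ys k x rest hd, ← hstate]; rfl
    rw [PySem.List.enumerate_cons, List.foldl_cons]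
    have hred : pvInnerB (xr, bal, res) ((k : Int) + 1, x) =
        (PySem.Int.bxor xr x, bal + (if PySem.Int.band x 1 ≠ 0 then 1 else -1),
          if PySem.Int.bxor xr x = 0 ∧ bal + (if PySem.Int.band x 1 ≠ 0 then 1 else -1) = 0
          then max res ((k : Int) + 1) else res) := rfl
    rw [hred]
    have hc : ((k : Int) + 1 + 1) = ((k + 1 : Nat) : Int) + 1 := by push_cast; ring
    rw [hc]
    set xr' := PySem.Int.bxor xr x with hxr'
    set bal' := bal + (if PySem.Int.band x 1 ≠ 0 then 1 else -1) with hbal'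
    set res' := if xr' = 0 ∧ bal' = 0 then max res ((k : Int) + 1) else res with hres'
    have hres_le : res ≤ res' := by
      rw [hres']
      split
      · exact le_max_left _ _
      · exact le_refl _
    obtain ⟨ihle, ihmem, ihbound⟩ := ih ys (k + 1) xr' bal' res' hd' hnew
    refine ⟨le_trans hres_le ihle, ?_, ?_⟩
    · rcases ihmem with hR | ⟨m, hm1, hm2, hm3, hm4⟩
      · rw [hR, hres']
        split
        · rename_i hzero
          rcases max_choice res ((k : Int) + 1) with hmx | hmx
          · exact Or.inl hmx
          · refine Or.inr ⟨k + 1, by omega, by omega, ?_, by rw [hmx]; push_cast; ring⟩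
            rw [← hnew, hzero.1, hzero.2]
        · exact Or.inl rfl
      · exact Or.inr ⟨m, by omega, hm2, hm3, hm4⟩
    · intro m hm1 hm2 hm3
      rcases Nat.lt_or_ge (k + 1) m with hlt | hge
      · exact ihbound m hlt hm2 hm3
      · have hme : m = k + 1 := by omega
        subst hme
        have heq := hnew.trans hm3
        have hzero : xr' = 0 ∧ bal' = 0 := ⟨congrArg Prod.fst heq, congrArg Prod.snd heq⟩
        have hres'' : res' = max res ((k : Int) + 1) := by rw [hres', if_pos hzero]
        have h1 : ((k + 1 : Nat) : Int) ≤ res' := by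
          rw [hres'']
          have := le_max_right res ((k : Int) + 1)
          push_cast
          omega
        exact le_trans h1 ihle

theorem pvBouter : ∀ (d : Nat) (nums : List Int) (t : Nat) (res : Int),
    t + d = nums.length →
    0 ≤ res →
    (res = 0 ∨ ∃ j i : Nat, pvPair nums j i ∧ res = (i : Int) - (j : Int)) →
    (∀ j i : Nat, pvPair nums j i → j < t → (i : Int) - (j : Int) ≤ res) →
    (0 ≤ (PySem.List.pyRange (t : Int) (nums.length : Int) 1).foldl (pvOuterB nums) res ∧
      ((PySem.List.pyRange (t : Int) (nums.length : Int) 1).foldl (pvOuterB nums) res = 0 ∨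
        ∃ j i : Nat, pvPair nums j i ∧
          (PySem.List.pyRange (t : Int) (nums.length : Int) 1).foldl (pvOuterB nums) res
            = (i : Int) - (j : Int)) ∧
      ∀ j i : Nat, pvPair nums j i →
        (i : Int) - (j : Int) ≤ (PySem.List.pyRange (t : Int) (nums.length : Int) 1).foldl (pvOuterB nums) res) := by
  intro d
  induction d with
  | zero =>
    intro nums t res hlen h0 hmem hbound
    have ht : t = nums.length := by omega
    subst ht
    rw [PySem.List.pyRange_one_eq_nil (le_refl _), List.foldl_nil]
    refine ⟨h0, hmem, ?_⟩
    intro j i hp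
    have h1 := hp.1
    have h2 := hp.2.1
    exact hbound j i hp (by omega)
  | succ d ih =>
    intro nums t res hlen h0 hmem hbound
    have htlt : (t : Int) < (nums.length : Int) := by
      have : t < nums.length := by omega
      exact_mod_cast this
    rw [PySem.List.pyRange_one_cons htlt, List.foldl_cons]
    have hc : ((t : Int) + 1) = ((t + 1 : Nat) : Int) := by push_cast; ring
    rw [hc]
    -- unfold one outer iteration into the inner-scan lemma
    have hslice : PySem.List.slice nums (some (t : Int)) none = nums.drop t := by
      rw [PySem.List.slice_from nums (Int.natCast_nonneg t)]
      simp
    have hinner := pvBinner (nums.drop t) (nums.drop t) 0 0 0 res List.drop_zero rfl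
    have houter : pvOuterB nums res (t : Int) =
        ((PySem.List.enumerate (nums.drop t) (((0 : Nat) : Int) + 1)).foldl pvInnerB (0, 0, res)).2.2 := by
      unfold pvOuterB
      rw [hslice]
      norm_num
    obtain ⟨hle, hmem', hbound'⟩ := hinner
    rw [← houter] at hle hmem' hbound'
    apply ih nums (t + 1) (pvOuterB nums res (t : Int)) (by omega) (le_trans h0 hle)
    · rcases hmem' with hR | ⟨m, hm1, hm2, hm3, hm4⟩
      · rw [hR]; exact hmem
      · have hlen' : (nums.drop t).length = nums.length - t := List.length_drop
        refine Or.inr ⟨t, t + m, ⟨by omega, by omega, ?_⟩, by omega⟩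
        exact ((pvGoodIff nums t m).mp hm3).symm
    · intro j i hp hj
      rcases Nat.lt_or_ge j t with hlt | hge
      · exact le_trans (hbound j i hp hlt) hle
      · have hje : j = t := by omega
        subst hje
        obtain ⟨hji, hil, hst⟩ := hp
        have hlen' : (nums.drop j).length = nums.length - j := List.length_drop
        have hm3 : pvState (nums.drop j) (i - j) = (0, 0) := by
          apply (pvGoodIff nums j (i - j)).mpr
          rw [show j + (i - j) = i by omega]
          exact hst.symm
        have hb := hbound' (i - j) (by omega) (by omega) hm3
        have hcast : ((i - j : Nat) : Int) = (i : Int) - (j : Int) := by omega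
        omega

theorem pvB_isMax (nums : List Int) : pvIsMax nums (maxBalancedSubarray_alt nums) := by
  have h := pvBouter nums.length nums 0 0 (by omega) (le_refl 0) (Or.inl rfl)
    (fun j i _ hj => absurd hj (Nat.not_lt_zero j))
  obtain ⟨h0, hmem, hbound⟩ := h
  exact ⟨h0, hmem, hbound⟩

-- ===== VERDICT (by name: the statement is the Claim_ definition above) =====
theorem maxBalancedSubarray_spec : Claim_equal_maxBalancedSubarray := by
  intro nums _
  unfold Spec_maxBalancedSubarray
  exact pvIsMax_unique nums _ _ (pvA_isMax nums) (pvB_isMax nums)
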